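-- pv_equiv track=rewrite | github.com/MarmerMax/Adaline | handleData.py | calculateActual
-- ===== SOURCE A (Python) =====
-- def calculateActual(targets):
--     positives = 0
--     negatives = 0
--     for item in targets:
--         if item == 1:
--             positives += 1
--         else:
--             negatives += 1
--
--     return positives, negatives
-- ===== SOURCE B (Python) =====
-- def calculateActual(targets):
--     n = len(targets)
--     if n == 0:
--         return 0, 0
--     if n == 1:
--         return (1, 0) if targets[0] == 1 else (0, 1)
--     mid = n // 2
--     p1, n1 = calculateActual(targets[:mid])
--     p2, n2 = calculateActual(targets[mid:])
--     return p1 + p2, n1 + n2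
-- ===== Notes on version B (the rewrite author's own statement) =====
-- stated objective: alternative
-- what changed: Replaces the single linear pass with two accumulators by a divide-and-conquer recursion: split the list at the midpoint, count each half recursively, and add the pair results.
import Mathlib
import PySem

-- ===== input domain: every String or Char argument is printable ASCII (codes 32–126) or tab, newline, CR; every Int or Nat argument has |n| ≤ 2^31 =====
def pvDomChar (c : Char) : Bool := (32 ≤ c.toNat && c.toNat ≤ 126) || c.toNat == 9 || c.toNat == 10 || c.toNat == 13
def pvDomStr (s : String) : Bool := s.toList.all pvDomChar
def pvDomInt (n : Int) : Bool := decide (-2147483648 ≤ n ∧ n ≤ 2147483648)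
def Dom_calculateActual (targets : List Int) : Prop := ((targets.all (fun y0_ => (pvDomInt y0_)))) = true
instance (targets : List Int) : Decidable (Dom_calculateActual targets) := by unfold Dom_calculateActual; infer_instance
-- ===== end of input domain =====

-- B counts by divide-and-conquer (split at the midpoint, recurse, add) instead of A's single loop with two accumulators.
-- ===== PORT A =====
def calculateActual (targets : List Int) : Int × Int :=
  targets.foldl (fun st item =>
    if item == 1 then (st.1 + 1, st.2) else (st.1, st.2 + 1)) (0, 0)

-- ===== PORT B =====
-- targets[:mid] / targets[mid:] with 0 ≤ mid ≤ len are exactly take/drop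
-- (PySem.List.slice_to_natCast / slice_from_natCast).
def calculateActual_alt (targets : List Int) : Int × Int :=
  if targets.length = 0 then (0, 0)
  else if targets.length = 1 then
    (if targets.headI == 1 then ((1 : Int), (0 : Int)) else (0, 1))
  else
    let mid := targets.length / 2
    let l := calculateActual_alt (targets.take mid)
    let r := calculateActual_alt (targets.drop mid)
    (l.1 + r.1, l.2 + r.2)
termination_by targets.length
decreasing_by
  · simp only [List.length_take]; omega
  · simp only [List.length_drop]; omega

-- ===== PRECONDITION & SPEC =====
def Spec_calculateActual (targets : List Int) (out : Int × Int) : Prop := out = calculateActual_alt targets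
instance (targets : List Int) (out : Int × Int) : Decidable (Spec_calculateActual targets out) := by unfold Spec_calculateActual; infer_instance

-- ===== CLAIM (what is proved, stated in full; the proofs are below) =====
def Claim_equal_calculateActual : Prop := ∀ (targets : List Int), Dom_calculateActual targets → Spec_calculateActual targets (calculateActual targets)

-- ===== LEMMAS AND PROOFS =====

-- Closed form of B's divide-and-conquer: (#ones, #non-ones).
lemma calcB_closed (targets : List Int) :
    calculateActual_alt targets
      = ((targets.count 1 : Int), ((targets.length : Int) - targets.count 1)) := by
  induction targets using calculateActual_alt.induct with
  | case1 xs h0 =>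
      rw [List.length_eq_zero_iff] at h0
      subst h0; simp [calculateActual_alt]
  | case2 xs h0 h1 hh =>
      obtain ⟨x, hx⟩ := List.length_eq_one_iff.mp h1
      subst hx
      simp only [List.headI, beq_iff_eq] at hh
      simp [calculateActual_alt, hh]
  | case3 xs h0 h1 hh =>
      obtain ⟨x, hx⟩ := List.length_eq_one_iff.mp h1
      subst hx
      simp only [List.headI, beq_iff_eq] at hh
      simp [calculateActual_alt, hh]
  | case4 xs h0 h1 mid ihl ihr =>
      have hm : mid = xs.length / 2 := rfl
      rw [hm] at ihl ihr
      rw [calculateActual_alt, if_neg h0, if_neg h1]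
      simp only [ihl, ihr]
      have hsplit : xs.take (xs.length / 2) ++ xs.drop (xs.length / 2) = xs :=
        List.take_append_drop _ _
      have hc : (xs.take (xs.length / 2)).count 1 + (xs.drop (xs.length / 2)).count 1
          = xs.count 1 := by
        conv_rhs => rw [← hsplit]
        rw [List.count_append]
      have hl : (xs.take (xs.length / 2)).length + (xs.drop (xs.length / 2)).length
          = xs.length := by
        conv_rhs => rw [← hsplit]
        rw [List.length_append]
      refine Prod.ext ?_ ?_ <;> · simp only []; omega

-- Closed form of A's foldl loop.
lemma calcA_foldl (targets : List Int) (p n : Int) :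
    targets.foldl (fun st item =>
      if item == 1 then (st.1 + 1, st.2) else (st.1, st.2 + 1)) (p, n)
      = (p + targets.count 1, n + ((targets.length : Int) - targets.count 1)) := by
  induction targets generalizing p n with
  | nil => simp
  | cons x xs ih =>
      simp only [List.foldl]
      by_cases hx : x = 1
      · subst hx
        rw [if_pos (by simp), ih, Prod.mk.injEq]
        constructor <;> · simp; try ring
      · rw [if_neg (by simpa using hx), ih, Prod.mk.injEq]
        constructor <;> · simp [hx]; try ring

-- ===== VERDICT (by name: the statement is the Claim_ definition above) =====
theorem calculateActual_spec : Claim_equal_calculateActual := by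
  intro targets _
  unfold Spec_calculateActual calculateActual
  rw [calcA_foldl, calcB_closed]
  simp
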